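-- pv_equiv track=rewrite | github.com/pypi-data/pypi-mirror-108 | packages/eeyore-nlp/eeyore_nlp-0.0.12-py3-none-any.whl/eeyore_nlp/pipelines/context_pipes.py | _get_start_positions
-- ===== SOURCE A (Python) =====
-- from typing import List
--
-- def _get_start_positions(
--                          tokens: List[str],
--                          spacings: List[str]) -> List[str]:
--     start_position = []
--     start = 0
--     for i, token in enumerate(tokens):
--         start_position.append(str(start))
--
--         start += len(token)
--         if spacings[i] == 'yes':
--             start += 1
--
--     return start_position
-- ===== SOURCE B (Python) =====
-- from typing import List
--
-- def _get_start_positions(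
--                          tokens: List[str],
--                          spacings: List[str]) -> List[str]:
--     sp = spacings[:len(tokens)]
--     end = sum(map(len, tokens)) + sp.count('yes')
--     out = []
--     for t, s in zip(reversed(tokens), reversed(sp)):
--         end -= len(t) + (s == 'yes')
--         out.append(str(end))
--     out.reverse()
--     return out
-- ===== Notes on version B (the rewrite author's own statement) =====
-- stated objective: alternative
-- what changed: Builds the result back-to-front: computes the total extent (sum of token lengths plus 'yes' count) up front, then walks the reversed token/spacing pairs subtracting each delta and reverses the collected output, instead of A's forward loop that appends the running offset before incrementing it.
import Mathlib
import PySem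

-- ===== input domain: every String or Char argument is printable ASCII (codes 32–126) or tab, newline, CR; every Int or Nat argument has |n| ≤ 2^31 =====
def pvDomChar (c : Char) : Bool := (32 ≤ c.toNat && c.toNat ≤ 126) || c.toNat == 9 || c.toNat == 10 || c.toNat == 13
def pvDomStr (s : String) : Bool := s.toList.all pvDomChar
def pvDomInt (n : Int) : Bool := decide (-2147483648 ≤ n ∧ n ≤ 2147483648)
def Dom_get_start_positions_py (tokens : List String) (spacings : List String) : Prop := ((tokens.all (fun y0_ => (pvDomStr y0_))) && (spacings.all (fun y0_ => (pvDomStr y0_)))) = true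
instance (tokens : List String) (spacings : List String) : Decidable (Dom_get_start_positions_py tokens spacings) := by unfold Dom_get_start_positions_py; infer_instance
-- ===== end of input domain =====

-- B builds the result back-to-front: it computes the total extent first, then walks the reversed lists subtracting each
-- token's delta; same return value as A's forward accumulator loop, no speed claim.

-- ===== PORT A =====
-- A's loop: running index i and running offset `start`, appending str(start) before updating
def pvGoA : List String → List String → Int → Int → List String
  | [], _, _, _ => []
  | t :: rest, spacings, i, start =>
      PySem.Int.toStr start ::
        pvGoA rest spacings (i + 1)
          (start + PySem.Str.len t +
            (if (PySem.List.pyGet? spacings i).getD "" == "yes" then 1 else 0))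

def get_start_positions_py (tokens : List String) (spacings : List String) : List String :=
  pvGoA tokens spacings 0 0

-- ===== PORT B =====
-- len(t) + (s == 'yes')
def pvDelta (ts : String × String) : Int :=
  PySem.Str.len ts.1 + (if ts.2 == "yes" then 1 else 0)

-- B: end = total extent; for t, s in zip(reversed(tokens), reversed(sp)): end -= delta; out.append(str(end)); out.reverse()
def get_start_positions_py_alt (tokens : List String) (spacings : List String) : List String :=
  let sp := PySem.List.slice spacings none (some (PySem.List.len tokens))
  let endTotal : Int := (tokens.map PySem.Str.len).sum + (PySem.List.count sp "yes" : Int)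
  let r := (tokens.reverse.zip sp.reverse).foldl
    (fun (p : Int × List String) ts =>
      let e := p.1 - pvDelta ts
      (e, p.2 ++ [PySem.Int.toStr e]))
    (endTotal, [])
  r.2.reverse

-- ===== PRECONDITION & SPEC =====
-- Pre_ excludes exactly the inputs where A raises IndexError: spacings shorter than tokens.
def Pre_get_start_positions_py (tokens : List String) (spacings : List String) : Prop :=
  tokens.length ≤ spacings.length
instance (tokens : List String) (spacings : List String) : Decidable (Pre_get_start_positions_py tokens spacings) := by unfold Pre_get_start_positions_py; infer_instance

def pvWitness_get_start_positions_py : List String × List String := (["ab", "c"], ["yes", "no"])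

def Spec_get_start_positions_py (tokens : List String) (spacings : List String) (out : List String) : Prop := out = get_start_positions_py_alt tokens spacings
instance (tokens : List String) (spacings : List String) (out : List String) : Decidable (Spec_get_start_positions_py tokens spacings out) := by unfold Spec_get_start_positions_py; infer_instance

-- ===== CLAIM =====
def Claim_equal_get_start_positions_py : Prop := ∀ (tokens : List String) (spacings : List String), Dom_get_start_positions_py tokens spacings → Pre_get_start_positions_py tokens spacings → Spec_get_start_positions_py tokens spacings (get_start_positions_py tokens spacings)

-- ===== LEMMAS AND PROOFS =====
-- the common shape both loops produce: emit the running offset, then add the pair's delta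
def pvG : List (String × String) → Int → List String
  | [], _ => []
  | x :: L, s => PySem.Int.toStr s :: pvG L (s + pvDelta x)

def pvSum (L : List (String × String)) : Int := (L.map pvDelta).sum

-- zip truncates the longer list (no Mathlib lemma found by search)
theorem pvZipTake {α β : Type} : ∀ (xs : List α) (ys : List β),
    xs.zip (ys.take xs.length) = xs.zip ys := by
  intro xs
  induction xs with
  | nil => intro ys; simp
  | cons x xs ih =>
      intro ys
      cases ys with
      | nil => simp
      | cons y ys => simp [List.zip_cons_cons, ih]

-- zipping the reversals is reversing the zip, for equal lengths (no Mathlib lemma found by search)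
theorem pvZipReverse {α β : Type} : ∀ (xs : List α) (ys : List β),
    xs.length = ys.length → xs.reverse.zip ys.reverse = (xs.zip ys).reverse := by
  intro xs
  induction xs with
  | nil =>
      intro ys h
      have hy : ys = [] := List.eq_nil_of_length_eq_zero h.symm
      subst hy; simp
  | cons x xs ih =>
      intro ys h
      cases ys with
      | nil => simp at h
      | cons y ys =>
          simp only [List.length_cons, Nat.add_right_cancel_iff] at h
          rw [List.reverse_cons, List.reverse_cons, List.zip_append (by simp [h]),
            ih ys h]
          simp [List.zip_cons_cons]

theorem pvSum_zip (tokens sp : List String) (h : tokens.length = sp.length) :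
    pvSum (tokens.zip sp) =
      (tokens.map PySem.Str.len).sum + (List.count "yes" sp : Int) := by
  induction tokens generalizing sp with
  | nil =>
      cases sp with
      | nil => simp [pvSum]
      | cons y ys => simp at h
  | cons t r ih =>
      cases sp with
      | nil => simp at h
      | cons s ss =>
          simp only [List.length_cons, Nat.add_right_cancel_iff] at h
          rw [List.zip_cons_cons,
            show pvSum ((t, s) :: r.zip ss) = pvDelta (t, s) + pvSum (r.zip ss) from by
              simp [pvSum],
            ih ss h]
          simp only [pvDelta, List.count_cons]
          by_cases hy : s = "yes" <;> simp [hy] <;> ring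

-- B's right-fold: it ends at e - pvSum L and writes pvG's output reversed
theorem pvFoldrB : ∀ (L : List (String × String)) (e : Int),
    L.foldr
        (fun ts (p : Int × List String) =>
          (p.1 - pvDelta ts, p.2 ++ [PySem.Int.toStr (p.1 - pvDelta ts)]))
        (e, []) =
      (e - pvSum L, (pvG L (e - pvSum L)).reverse) := by
  intro L
  induction L with
  | nil => intro e; simp [pvSum, pvG]
  | cons x L ih =>
      intro e
      simp only [List.foldr_cons, ih e, pvG, List.reverse_cons, Prod.mk.injEq]
      have h1 : e - pvSum L - pvDelta x = e - pvSum (x :: L) := by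
        simp only [pvSum, List.map_cons, List.sum_cons]; ring
      have h2 : e - pvSum (x :: L) + pvDelta x = e - pvSum L := by
        simp only [pvSum, List.map_cons, List.sum_cons]; ring
      rw [h1, h2]
      exact ⟨rfl, rfl⟩

-- A's loop is pvG over tokens zipped with the rest of spacings
theorem pvGoA_eq_pvG (spacings : List String) :
    ∀ (tokens : List String) (k : Nat) (start : Int),
      k + tokens.length ≤ spacings.length →
      pvGoA tokens spacings (k : Int) start =
        pvG (tokens.zip (spacings.drop k)) start := by
  intro tokens
  induction tokens with
  | nil => intro k start h; simp [pvGoA, pvG]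
  | cons t r ih =>
      intro k start h
      have hk : k < spacings.length := by simp at h; omega
      have hdrop : spacings.drop k = spacings[k] :: spacings.drop (k + 1) :=
        List.drop_eq_getElem_cons hk
      have hget : PySem.List.pyGet? spacings (k : Int) = some spacings[k] := by
        simp [pysem, hk]
      have hstep : ((k : Int) + 1) = ((k + 1 : Nat) : Int) := by push_cast; ring
      rw [show pvGoA (t :: r) spacings (k : Int) start =
            PySem.Int.toStr start ::
              pvGoA r spacings ((k : Int) + 1)
                (start + PySem.Str.len t +
                  (if (PySem.List.pyGet? spacings (k : Int)).getD "" == "yes" then 1 else 0))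
            from rfl,
          hstep, ih (k + 1) _ (by simp at h ⊢; omega), hdrop, hget]
      simp only [List.zip_cons_cons, pvG, Option.getD_some, pvDelta]
      rw [add_assoc]
      rfl

theorem get_start_positions_py_spec : Claim_equal_get_start_positions_py := by
  intro tokens spacings _ hpre
  show get_start_positions_py tokens spacings = get_start_positions_py_alt tokens spacings
  have hpre' : tokens.length ≤ spacings.length := hpre
  -- the slice sp = spacings[:len(tokens)] and its length under Pre_
  have hsp : PySem.List.slice spacings none (some (PySem.List.len tokens)) =
      spacings.take tokens.length := by
    simp [PySem.List.slice_to_natCast]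
  have hlen : (spacings.take tokens.length).length = tokens.length := by
    simp [hpre']
  -- B reduces to pvG over the zip
  have hB : get_start_positions_py_alt tokens spacings =
      pvG (tokens.zip (spacings.take tokens.length)) 0 := by
    rw [get_start_positions_py_alt]
    simp only [hsp, PySem.List.count_eq,
      pvZipReverse tokens (spacings.take tokens.length) hlen.symm,
      List.foldl_reverse]
    rw [pvFoldrB]
    rw [pvSum_zip tokens (spacings.take tokens.length) hlen.symm]
    simp
  -- A reduces to the same pvG
  have hA : get_start_positions_py tokens spacings =
      pvG (tokens.zip spacings) 0 := by
    have h0 := pvGoA_eq_pvG spacings tokens 0 0 (by omega)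
    simp only [Nat.cast_zero, List.drop_zero] at h0
    rw [get_start_positions_py, h0]
  rw [hA, hB, pvZipTake]
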